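-- pv_equiv track=rewrite | github.com/holo-q/petri | optimizers/cbd.py | _create_dynamic_pattern
-- ===== SOURCE A (Python) =====
-- from typing import List, Dict, Optional
-- from typing import Optional, List, Dict
--
-- def _create_dynamic_pattern(size: int) -> List[List[str]]:
--     """Create a tiled pattern of dynamics."""
--     basic_pattern = ['V', 'W', 'phi', 'e']
--     pattern = []
--     for i in range(size):
--         row = []
--         for j in range(size):
--             idx = (i + j) % len(basic_pattern)
--             row.append(basic_pattern[idx])
--         pattern.append(row)
--     return pattern
-- ===== SOURCE B (Python) =====
-- from typing import List
--
-- def _create_dynamic_pattern(size: int) -> List[List[str]]: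
--     """Create a tiled pattern of dynamics."""
--     basic_pattern = ['V', 'W', 'phi', 'e']
--     ext = basic_pattern * (size // 4 + 2)
--     return [ext[i % 4 : i % 4 + size] for i in range(size)]
-- ===== Notes on version B (the rewrite author's own statement) =====
-- stated objective: alternative
-- what changed: Replaces the nested modular-index loop with one precomputed extended pattern table plus a per-row slice, so no per-element index arithmetic remains.
import Mathlib
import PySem

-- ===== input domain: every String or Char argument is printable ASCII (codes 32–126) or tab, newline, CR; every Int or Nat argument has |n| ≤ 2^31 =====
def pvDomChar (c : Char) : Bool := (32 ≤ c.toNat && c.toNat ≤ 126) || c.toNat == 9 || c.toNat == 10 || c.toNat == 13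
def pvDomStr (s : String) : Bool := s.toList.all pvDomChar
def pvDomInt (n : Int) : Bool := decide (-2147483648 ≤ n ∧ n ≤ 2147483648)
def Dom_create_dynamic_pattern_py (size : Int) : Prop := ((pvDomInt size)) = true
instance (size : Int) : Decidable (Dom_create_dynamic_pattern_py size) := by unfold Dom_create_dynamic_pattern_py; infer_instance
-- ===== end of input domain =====

-- B builds one extended pattern table once and slices each row out of it instead of
-- recomputing a modular index per element (objective: alternative decomposition).

-- ===== PORT A =====
-- literal transliteration: nested loops appending one element / one row at a time
def create_dynamic_pattern_py (size : Int) : List (List String) :=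
  let basic_pattern : List String := ["V", "W", "phi", "e"]
  (PySem.List.pyRange 0 size 1).foldl
    (fun pattern i =>
      pattern ++
        [(PySem.List.pyRange 0 size 1).foldl
          (fun row j =>
            row ++ [PySem.List.pyGetD basic_pattern
                      (PySem.Int.mod (i + j) (basic_pattern.length : Int)) ""])
          []])
    []

-- ===== PORT B =====
-- literal transliteration of Source B: ext = basic_pattern * (size // 4 + 2); rows are slices
def create_dynamic_pattern_py_alt (size : Int) : List (List String) :=
  let basic_pattern : List String := ["V", "W", "phi", "e"]
  let ext : List String :=
    List.flatten (List.replicate (PySem.Int.floordiv size 4 + 2).toNat basic_pattern)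
  (PySem.List.pyRange 0 size 1).map
    (fun i => PySem.List.slice ext (some (PySem.Int.mod i 4))
                (some (PySem.Int.mod i 4 + size)))

-- ===== PRECONDITION & SPEC =====
def Spec_create_dynamic_pattern_py (size : Int) (out : List (List String)) : Prop := out = create_dynamic_pattern_py_alt size
instance (size : Int) (out : List (List String)) : Decidable (Spec_create_dynamic_pattern_py size out) := by unfold Spec_create_dynamic_pattern_py; infer_instance

-- ===== CLAIM (what is proved, stated in full; the proofs are below) =====
def Claim_equal_create_dynamic_pattern_py : Prop := ∀ (size : Int), Dom_create_dynamic_pattern_py size → Spec_create_dynamic_pattern_py size (create_dynamic_pattern_py size)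

-- ===== LEMMAS AND PROOFS =====

-- folding "append one element" is map
lemma foldl_push {α β : Type} (f : α → β) :
    ∀ (xs : List α) (init : List β),
      xs.foldl (fun acc x => acc ++ [f x]) init = init ++ xs.map f := by
  intro xs
  induction xs with
  | nil => simp
  | cons x xs ih => intro init; simp [List.foldl_cons, ih]

-- element of the tiled table: cycles through basic with period 4
lemma getElem?_flatten_replicate (basic : List String) (h4 : basic.length = 4) :
    ∀ (M m : Nat), m < 4 * M →
      (List.flatten (List.replicate M basic))[m]? = basic[m % 4]? := by
  intro M
  induction M with
  | zero => intro m hm; omega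
  | succ M ih =>
    intro m hm
    rw [List.replicate_succ, List.flatten_cons]
    by_cases hlt : m < 4
    · rw [List.getElem?_append_left (by omega)]
      congr 1
      omega
    · rw [List.getElem?_append_right (by omega), h4, ih (m - 4) (by omega)]
      congr 1
      omega

lemma length_flatten_replicate (basic : List String) (h4 : basic.length = 4) (M : Nat) :
    (List.flatten (List.replicate M basic)).length = 4 * M := by
  simp [List.length_flatten, h4, Nat.mul_comm]

-- one row of A equals the corresponding slice of B's table
lemma row_eq (size i : Int) (h0 : 0 ≤ i) (hi : i < size) :
    (PySem.List.pyRange 0 size 1).map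
        (fun j => PySem.List.pyGetD (["V", "W", "phi", "e"] : List String)
          (PySem.Int.mod (i + j) 4) "") =
      PySem.List.slice
        (List.flatten (List.replicate (PySem.Int.floordiv size 4 + 2).toNat
          (["V", "W", "phi", "e"] : List String)))
        (some (PySem.Int.mod i 4)) (some (PySem.Int.mod i 4 + size)) := by
  have hpos : (0:Int) < size := lt_of_le_of_lt h0 hi
  set basic : List String := ["V", "W", "phi", "e"] with hbasic
  have h4 : basic.length = 4 := rfl
  set M : Nat := (PySem.Int.floordiv size 4 + 2).toNat with hM
  set n : Nat := size.toNat with hn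
  -- size bound for the table
  have hfd : PySem.Int.floordiv size 4 = size / 4 :=
    PySem.Int.floordiv_eq_ediv_of_pos (by omega)
  have hMn : n + 3 ≤ 4 * M := by
    have h1 : 4 * (size / 4) + size % 4 = size := Int.mul_ediv_add_emod size 4
    
    have h2 : 0 ≤ size % 4 := Int.emod_nonneg size (by omega)
    have h3 : size % 4 < 4 := Int.emod_lt_of_pos size (by omega)
    omega
  have hmod : PySem.Int.mod i 4 = i % 4 := PySem.Int.mod_eq_emod_of_pos (by omega)
  set r : Nat := (i % 4).toNat with hr
  have hrval : i % 4 = (r : Int) := by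
    have := Int.emod_nonneg i (show (4:Int) ≠ 0 by omega)
    omega
  have hr4 : r < 4 := by
    have := Int.emod_lt_of_pos i (show (0:Int) < 4 by omega)
    omega
  have hlen : (List.flatten (List.replicate M basic)).length = 4 * M :=
    length_flatten_replicate basic h4 M
  -- reduce the slice to drop/take
  rw [hmod, hrval]
  have hsz : (r : Int) + size = ((r + n : Nat) : Int) := by push_cast; omega
  rw [hsz, PySem.List.slice_natCast]
  have htake : r + n - r = n := by omega
  rw [htake]
  -- elementwise
  rw [PySem.List.pyRange_one]
  apply List.ext_getElem?
  intro k
  by_cases hk : k < n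
  · have hsub : (size - 0).toNat = n := by omega
    rw [List.getElem?_map, List.getElem?_map]
    rw [List.getElem?_range (by omega)]
    simp only [Option.map_some]
    have hrk : r + k < (List.flatten (List.replicate M basic)).length := by omega
    rw [List.getElem?_take, if_pos hk, List.getElem?_drop]
    rw [getElem?_flatten_replicate basic h4 M (r + k) (by omega)]
    have hmod2 : PySem.Int.mod (i + (0 + (k : Int))) 4 = (((r + k) % 4 : Nat) : Int) := by
      rw [PySem.Int.mod_eq_emod_of_pos (by omega)]
      push_cast
      omega
    rw [hmod2, PySem.List.pyGetD_natCast]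
    have hm4 : (r + k) % 4 < 4 := Nat.mod_lt _ (by omega)
    rw [List.getD_eq_getElem?_getD, List.getElem?_eq_getElem (by omega)]
    rfl
  · have h1 : ((List.range (size - 0).toNat).map (fun kk => (0:Int) + kk)).length ≤ k := by
      simp; omega
    have h2 : (((List.flatten (List.replicate M basic)).drop r).take n).length ≤ k := by
      simp [hlen]; omega
    rw [List.getElem?_eq_none (by simpa using h1), List.getElem?_eq_none h2]

-- ===== VERDICT (by name: the statement is the Claim_ definition above) =====
theorem create_dynamic_pattern_py_spec : Claim_equal_create_dynamic_pattern_py := by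
  intro size _
  unfold Spec_create_dynamic_pattern_py create_dynamic_pattern_py create_dynamic_pattern_py_alt
  simp only
  rw [foldl_push]
  simp only [List.nil_append]
  apply List.map_congr_left
  intro i hi
  rw [PySem.List.mem_pyRange_one] at hi
  rw [foldl_push]
  simp only [List.nil_append, List.length_cons, List.length_nil]
  exact row_eq size i hi.1 hi.2
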